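-- pv_equiv track=rewrite | github.com/cocodedk/clawpwn | src/clawpwn/cli_commands/scan_helpers.py | parse_web_tools
-- ===== SOURCE A (Python) =====
-- WEB_TOOLS = ("builtin", "nuclei", "feroxbuster", "ffuf", "nikto", "searchsploit", "zap")
--
-- def parse_web_tools(raw: str | None) -> list[str]:
--     """Normalize --web-tools option into ordered unique tool names."""
--     if raw is None or not isinstance(raw, str):
--         return ["builtin"]
--     cleaned = raw.strip().lower()
--     if not cleaned:
--         return ["builtin"]
--
--     aliases = {
--         "owasp-zap": "zap",
--         "zap-baseline": "zap",
--         "default": "builtin",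
--         "dirbuster": "feroxbuster",
--         "dirb": "feroxbuster",
--     }
--     selected: list[str] = []
--     unknown: list[str] = []
--     for item in cleaned.split(","):
--         token = aliases.get(item.strip(), item.strip())
--         if not token:
--             continue
--         if token == "all":
--             selected = list(WEB_TOOLS)
--             continue
--         if token not in WEB_TOOLS:
--             unknown.append(token)
--             continue
--         if token not in selected:
--             selected.append(token)
--
--     if unknown:
--         supported = ", ".join(WEB_TOOLS)
--         raise ValueError(
--             f"Unknown web scanner tool(s): {', '.join(sorted(set(unknown)))}. "
--             f"Supported values: {supported}, all."
--         )
--     return selected or ["builtin"]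
-- ===== SOURCE B (Python) =====
-- WEB_TOOLS = ("builtin", "nuclei", "feroxbuster", "ffuf", "nikto", "searchsploit", "zap")
--
-- ALIASES = {
--     "owasp-zap": "zap",
--     "zap-baseline": "zap",
--     "default": "builtin",
--     "dirbuster": "feroxbuster",
--     "dirb": "feroxbuster",
-- }
--
--
-- def parse_web_tools(raw):
--     """Normalize --web-tools option into ordered unique tool names.
--
--     Single character-level scan: tokens are cut at commas on the fly and
--     classified immediately into a has-all flag, an ordered key dict and an
--     unknown set; no split()/selected-list bookkeeping.
--     """
--     if raw is None or not isinstance(raw, str):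
--         return ["builtin"]
--     cleaned = raw.strip().lower()
--     has_all = False
--     chosen = {}
--     unknown = set()
--     buf = []
--     for ch in cleaned + ",":
--         if ch != ",":
--             buf.append(ch)
--             continue
--         token = "".join(buf).strip()
--         buf = []
--         token = ALIASES.get(token, token)
--         if not token:
--             continue
--         if token == "all":
--             has_all = True
--         elif token in WEB_TOOLS:
--             chosen.setdefault(token)
--         else:
--             unknown.add(token)
--     if unknown:
--         raise ValueError(
--             f"Unknown web scanner tool(s): {', '.join(sorted(unknown))}. "
--             f"Supported values: {', '.join(WEB_TOOLS)}, all."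
--         )
--     if has_all:
--         return list(WEB_TOOLS)
--     return list(chosen) or ["builtin"]
-- ===== Notes on version B (the rewrite author's own statement) =====
-- stated objective: alternative
-- what changed: Replaced A's split(',') plus stateful selected/unknown list loop (with the 'all' reset of selected) by a single character-level scanner that cuts tokens at commas on the fly and classifies each immediately into a has_all flag, an insertion-ordered key dict and an unknown set.
import Mathlib
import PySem

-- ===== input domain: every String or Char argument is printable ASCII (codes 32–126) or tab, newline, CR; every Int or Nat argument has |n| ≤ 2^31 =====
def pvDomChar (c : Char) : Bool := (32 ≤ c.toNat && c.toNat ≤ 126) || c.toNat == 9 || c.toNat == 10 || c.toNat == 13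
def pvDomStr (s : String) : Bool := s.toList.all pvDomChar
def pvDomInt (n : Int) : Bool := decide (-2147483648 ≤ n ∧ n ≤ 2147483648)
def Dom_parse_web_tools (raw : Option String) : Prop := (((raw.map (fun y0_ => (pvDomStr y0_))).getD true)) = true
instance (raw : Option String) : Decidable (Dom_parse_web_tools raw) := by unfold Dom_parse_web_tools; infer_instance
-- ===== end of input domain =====

-- B replaces A's split(",")+stateful-list loop by a single character-level scanner
-- with a has_all flag, an ordered key dict and an unknown set; equivalence is about
-- the RETURN value (inputs with unknown tool names, on which both raise ValueError,
-- are outside Pre_).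

-- ===== PORT A =====
def pwtWEB_TOOLS : List String :=
  ["builtin", "nuclei", "feroxbuster", "ffuf", "nikto", "searchsploit", "zap"]

def pwtAliases : PySem.Dict String String :=
  PySem.Dict.ofList
    [("owasp-zap", "zap"), ("zap-baseline", "zap"), ("default", "builtin"),
     ("dirbuster", "feroxbuster"), ("dirb", "feroxbuster")]

-- aliases.get(item.strip(), item.strip())
def pwtNorm (item : String) : String :=
  PySem.Dict.getD pwtAliases (PySem.Str.strip item) (PySem.Str.strip item)

-- one iteration of A's for-loop, on the state (selected, unknown)
def pwtLoopStep (st : List String × List String) (item : String) : List String × List String :=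
  let token := pwtNorm item
  if token = "" then st
  else if token = "all" then (pwtWEB_TOOLS, st.2)
  else if token ∉ pwtWEB_TOOLS then (st.1, st.2 ++ [token])
  else if token ∈ st.1 then st
  else (st.1 ++ [token], st.2)

def parse_web_tools (raw : Option String) : List String :=
  match raw with
  | none => ["builtin"]
  | some r =>
    let cleaned := PySem.Str.lower (PySem.Str.strip r)
    if cleaned = "" then ["builtin"]
    else
      -- split? is some for the literal separator ","
      let res := ((PySem.Str.split? cleaned ",").getD []).foldl pwtLoopStep ([], [])
      -- Python raises ValueError when res.2 ≠ []; those inputs are excluded by Pre_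
      if res.2 ≠ [] then []
      else if res.1 = [] then ["builtin"] else res.1

-- ===== PORT B =====
-- one iteration of B's for-loop over the characters of cleaned + ",",
-- on the state (has_all, chosen, unknown, buf)
def pwtBStep (st : Bool × PySem.Dict String Unit × List String × List Char) (c : Char) :
    Bool × PySem.Dict String Unit × List String × List Char :=
  if c ≠ ',' then (st.1, st.2.1, st.2.2.1, st.2.2.2 ++ [c])
  else
    let token := pwtNorm (String.ofList st.2.2.2)  -- ALIASES.get("".join(buf).strip(), …)
    if token = "" then (st.1, st.2.1, st.2.2.1, [])
    else if token = "all" then (true, st.2.1, st.2.2.1, [])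
    else if token ∈ pwtWEB_TOOLS then (st.1, st.2.1.setdefault token (), st.2.2.1, [])
    else (st.1, st.2.1, PySem.Set.add st.2.2.1 token, [])

def parse_web_tools_alt (raw : Option String) : List String :=
  match raw with
  | none => ["builtin"]
  | some r =>
    let cleaned := PySem.Str.lower (PySem.Str.strip r)
    let res := (cleaned.toList ++ [',']).foldl pwtBStep (false, PySem.Dict.ofList [], [], [])
    -- Python raises ValueError when unknown is nonempty; those inputs are excluded by Pre_
    if res.2.2.1 ≠ [] then []
    else if res.1 then pwtWEB_TOOLS
    else if res.2.1.keys = [] then ["builtin"] else res.2.1.keys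

-- ===== PRECONDITION & SPEC =====
-- Pre_ excludes exactly the inputs containing an unknown tool name, on which A (and B) raise ValueError.
def Pre_parse_web_tools (raw : Option String) : Prop :=
  ∀ r ∈ raw.toList,
    ∀ item ∈ (PySem.Str.split? (PySem.Str.lower (PySem.Str.strip r)) ",").getD [],
      pwtNorm item = "" ∨ pwtNorm item = "all" ∨ pwtNorm item ∈ pwtWEB_TOOLS
instance (raw : Option String) : Decidable (Pre_parse_web_tools raw) := by
  unfold Pre_parse_web_tools; infer_instance
def pvWitness_parse_web_tools : Option String := some " Nuclei, all ,dirb,nuclei"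
def Spec_parse_web_tools (raw : Option String) (out : List String) : Prop := out = parse_web_tools_alt raw
instance (raw : Option String) (out : List String) : Decidable (Spec_parse_web_tools raw out) := by unfold Spec_parse_web_tools; infer_instance

-- ===== CLAIM (what is proved, stated in full; the proofs are below) =====
def Claim_equal_parse_web_tools : Prop := ∀ (raw : Option String), Dom_parse_web_tools raw → Pre_parse_web_tools raw → Spec_parse_web_tools raw (parse_web_tools raw)

-- ===== LEMMAS AND PROOFS =====

-- splitting a character list at commas, with the pending prefix `pre` (B's buf)
def pwtSplit (pre : List Char) : List Char → List (List Char)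
  | [] => [pre]
  | c :: rest => if c = ',' then pre :: pwtSplit [] rest else pwtSplit (pre ++ [c]) rest

-- PySem's splitOn on the single-character separator "," is pwtSplit
theorem pwtGo (l : List Char) : ∀ (fuel : Nat) (cur : List Char) (acc : List (List Char)),
    l.length ≤ fuel →
    PySem.Chars.splitOn.go [','] fuel l cur acc = acc.reverse ++ pwtSplit cur.reverse l := by
  induction l with
  | nil =>
    intro fuel cur acc _
    cases fuel <;> simp [PySem.Chars.splitOn.go, pwtSplit]
  | cons c rest ih =>
    intro fuel cur acc hf
    cases fuel with
    | zero => simp at hf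
    | succ f =>
      rw [PySem.Chars.splitOn.go.eq_def]
      by_cases hc : c = ','
      · subst hc
        have hp : [','].isPrefixOf (',' :: rest) = true := by simp [List.isPrefixOf]
        simp only [hp, if_true]
        rw [show List.drop [','].length (',' :: rest) = rest from rfl]
        rw [ih f [] (cur.reverse :: acc) (by simp at hf; omega)]
        simp [pwtSplit]
      · have hp : [','].isPrefixOf (c :: rest) = false := by
          simp [List.isPrefixOf]
          intro h'; exact absurd h'.symm hc
        simp only [hp, Bool.false_eq_true, if_false]
        rw [ih f (c :: cur) acc (by simp at hf; omega)]
        simp [pwtSplit, hc]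

theorem pwtSplitOn (cs : List Char) :
    PySem.Chars.splitOn cs [','] = pwtSplit [] cs := by
  unfold PySem.Chars.splitOn
  rw [pwtGo cs (cs.length + 1) [] [] (by omega)]
  simp

-- one token of B's scanner, on the state (has_all, chosen, unknown)
def pwtTok (st : Bool × PySem.Dict String Unit × List String) (tok : List Char) :
    Bool × PySem.Dict String Unit × List String :=
  let token := pwtNorm (String.ofList tok)
  if token = "" then st
  else if token = "all" then (true, st.2.1, st.2.2)
  else if token ∈ pwtWEB_TOOLS then (st.1, st.2.1.setdefault token (), st.2.2)
  else (st.1, st.2.1, PySem.Set.add st.2.2 token)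

theorem pwtBStep_comma (h : Bool) (d : PySem.Dict String Unit) (u : List String) (buf : List Char) :
    pwtBStep (h, d, u, buf) ',' =
      ((pwtTok (h, d, u) buf).1, (pwtTok (h, d, u) buf).2.1, (pwtTok (h, d, u) buf).2.2, []) := by
  simp only [pwtBStep, pwtTok]
  rw [if_neg (by simp)]
  split_ifs <;> rfl

-- B's character fold equals the token fold over pwtSplit
theorem pwtScan (cs : List Char) :
    ∀ (h : Bool) (d : PySem.Dict String Unit) (u : List String) (buf : List Char),
    (cs ++ [',']).foldl pwtBStep (h, d, u, buf) =
      (((pwtSplit buf cs).foldl pwtTok (h, d, u)).1,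
       ((pwtSplit buf cs).foldl pwtTok (h, d, u)).2.1,
       ((pwtSplit buf cs).foldl pwtTok (h, d, u)).2.2, []) := by
  induction cs with
  | nil =>
    intro h d u buf
    simp only [List.nil_append, List.foldl_cons, List.foldl_nil, pwtSplit, pwtBStep_comma]
  | cons c rest ih =>
    intro h d u buf
    by_cases hc : c = ','
    · subst hc
      simp only [List.cons_append, List.foldl_cons, pwtBStep_comma]
      rw [ih]
      simp [pwtSplit]
    · have hstep : pwtBStep (h, d, u, buf) c = (h, d, u, buf ++ [c]) := by
        simp [pwtBStep, hc]
      simp only [List.cons_append, List.foldl_cons, hstep]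
      rw [ih]
      simp [pwtSplit, hc]

-- the dedup step of A's loop on selected
def pwtStep (sel : List String) (t : String) : List String :=
  if t ∈ sel then sel else sel ++ [t]

theorem pwtStep_of_subset {sel : List String} {l : List String}
    (h : ∀ x ∈ l, x ∈ sel) : l.foldl pwtStep sel = sel := by
  induction l with
  | nil => rfl
  | cons t ts ih =>
    have ht : t ∈ sel := h t (by simp)
    simp only [List.foldl_cons, pwtStep, if_pos ht]
    exact ih (fun x hx => h x (by simp [hx]))

theorem pwtStep_eq_add : pwtStep = PySem.Set.add := by
  funext sel t
  simp [pwtStep, PySem.Set.add, PySem.Set.contains, List.contains_eq_mem]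

-- normalized nonempty tokens of an item list
def pwtToks (ts : List String) : List String :=
  (ts.map pwtNorm).filter (fun t => t ≠ "")

-- A's loop, under Pre_: unknown stays empty and selected is the dedup fold / WEB_TOOLS
theorem pwtFold (ts : List String) (sel : List String)
    (h : ∀ item ∈ ts, pwtNorm item = "" ∨ pwtNorm item = "all" ∨ pwtNorm item ∈ pwtWEB_TOOLS) :
    ts.foldl pwtLoopStep (sel, []) =
      (if "all" ∈ pwtToks ts then pwtWEB_TOOLS else (pwtToks ts).foldl pwtStep sel, []) := by
  induction ts generalizing sel with
  | nil => simp [pwtToks]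
  | cons item ts ih =>
    have htail : ∀ x ∈ ts, pwtNorm x = "" ∨ pwtNorm x = "all" ∨ pwtNorm x ∈ pwtWEB_TOOLS :=
      fun x hx => h x (by simp [hx])
    by_cases he : pwtNorm item = ""
    · have hstep : pwtLoopStep (sel, []) item = (sel, []) := by
        simp [pwtLoopStep, he]
      have htoks : pwtToks (item :: ts) = pwtToks ts := by
        simp [pwtToks, he]
      rw [List.foldl_cons, hstep, htoks, ih sel htail]
    · by_cases hall : pwtNorm item = "all"
      · have hstep : pwtLoopStep (sel, []) item = (pwtWEB_TOOLS, []) := by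
          simp [pwtLoopStep, hall]
        have htoks : pwtToks (item :: ts) = "all" :: pwtToks ts := by
          simp [pwtToks, hall]
        rw [List.foldl_cons, hstep, ih pwtWEB_TOOLS htail, htoks]
        by_cases hmem : "all" ∈ pwtToks ts
        · simp [hmem]
        · have hW : ∀ x ∈ pwtToks ts, x ∈ pwtWEB_TOOLS := by
            intro x hx
            have hx' : x ∈ (ts.map pwtNorm) ∧ x ≠ "" := by
              simpa [pwtToks, List.mem_filter] using hx
            obtain ⟨y, hy, rfl⟩ := List.mem_map.mp hx'.1
            rcases htail y hy with h1 | h1 | h1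
            · exact absurd h1 hx'.2
            · exact absurd (h1 ▸ hx) hmem
            · exact h1
          simp [hmem, pwtStep_of_subset hW]
      · have hW : pwtNorm item ∈ pwtWEB_TOOLS := by
          rcases h item (by simp) with h1 | h1 | h1
          · exact absurd h1 he
          · exact absurd h1 hall
          · exact h1
        have hstep : pwtLoopStep (sel, []) item = (pwtStep sel (pwtNorm item), []) := by
          simp only [pwtLoopStep, pwtStep, he, hall, hW, if_neg, not_true, not_false_iff]
          by_cases hm : pwtNorm item ∈ sel <;> simp [hm]
        have htoks : pwtToks (item :: ts) = pwtNorm item :: pwtToks ts := by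
          simp [pwtToks, he]
        rw [List.foldl_cons, hstep, ih (pwtStep sel (pwtNorm item)) htail, htoks]
        have hne : ("all" ∈ pwtNorm item :: pwtToks ts) ↔ ("all" ∈ pwtToks ts) := by
          constructor
          · intro h'
            rcases List.mem_cons.mp h' with h' | h'
            · exact absurd h'.symm hall
            · exact h'
          · exact List.mem_cons_of_mem _
        by_cases hmem : "all" ∈ pwtToks ts <;> simp [hmem, hne, List.foldl_cons]

-- keys of a setdefault are PySem.Set.add on the keys
theorem pwtKeys_setdefault (d : PySem.Dict String Unit) (k : String) :
    (d.setdefault k ()).keys = PySem.Set.add d.keys k := by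
  rw [PySem.Dict.keys_setdefault]
  by_cases hm : k ∈ d.keys
  · rw [if_pos ((PySem.Dict.contains_iff_mem_keys d k).mpr hm)]
    simp [PySem.Set.add, PySem.Set.contains, List.contains_eq_mem, hm]
  · rw [if_neg (by simpa using (PySem.Dict.contains_iff_mem_keys d k).not.mpr hm)]
    simp [PySem.Set.add, PySem.Set.contains, List.contains_eq_mem, hm]

-- B's token fold, under Pre_: unknown stays empty, has_all tracks "all",
-- keys accumulate the non-"all" tokens with Set.add
theorem pwtTokFold (toks : List String) (hb : Bool) (d : PySem.Dict String Unit)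
    (h : ∀ t ∈ toks, pwtNorm t = "" ∨ pwtNorm t = "all" ∨ pwtNorm t ∈ pwtWEB_TOOLS) :
    ((toks.map String.toList).foldl pwtTok (hb, d, [])).1
        = (hb || decide ("all" ∈ pwtToks toks))
    ∧ ((toks.map String.toList).foldl pwtTok (hb, d, [])).2.1.keys
        = ((pwtToks toks).filter (fun t => t ≠ "all")).foldl PySem.Set.add d.keys
    ∧ ((toks.map String.toList).foldl pwtTok (hb, d, [])).2.2 = [] := by
  induction toks generalizing hb d with
  | nil => simp [pwtToks]
  | cons t ts ih =>
    have htail : ∀ x ∈ ts, pwtNorm x = "" ∨ pwtNorm x = "all" ∨ pwtNorm x ∈ pwtWEB_TOOLS :=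
      fun x hx => h x (by simp [hx])
    by_cases he : pwtNorm t = ""
    · have hstep : pwtTok (hb, d, []) t.toList = (hb, d, []) := by
        simp [pwtTok, he]
      have htoks : pwtToks (t :: ts) = pwtToks ts := by simp [pwtToks, he]
      simpa [List.foldl_cons, hstep, htoks] using ih hb d htail
    · by_cases hall : pwtNorm t = "all"
      · have hstep : pwtTok (hb, d, []) t.toList = (true, d, []) := by
          simp [pwtTok, hall]
        have htoks : pwtToks (t :: ts) = "all" :: pwtToks ts := by
          simp [pwtToks, hall]
        obtain ⟨i1, i2, i3⟩ := ih true d htail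
        refine ⟨?_, ?_, ?_⟩
        · simp [List.foldl_cons, hstep, htoks, i1]
        · simp only [List.map_cons, List.foldl_cons, hstep]
          rw [i2, htoks]
          simp
        · simpa [List.foldl_cons, hstep] using i3
      · have hW : pwtNorm t ∈ pwtWEB_TOOLS := by
          rcases h t (by simp) with h1 | h1 | h1
          · exact absurd h1 he
          · exact absurd h1 hall
          · exact h1
        have hstep : pwtTok (hb, d, []) t.toList = (hb, d.setdefault (pwtNorm t) (), []) := by
          simp [pwtTok, he, hall, hW]
        have htoks : pwtToks (t :: ts) = pwtNorm t :: pwtToks ts := by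
          simp [pwtToks, he]
        obtain ⟨i1, i2, i3⟩ := ih hb (d.setdefault (pwtNorm t) ()) htail
        refine ⟨?_, ?_, ?_⟩
        · rw [List.map_cons, List.foldl_cons, hstep, i1, htoks]
          have : ("all" ∈ pwtNorm t :: pwtToks ts) ↔ ("all" ∈ pwtToks ts) := by
            constructor
            · intro h'
              rcases List.mem_cons.mp h' with h' | h'
              · exact absurd h'.symm hall
              · exact h'
            · exact List.mem_cons_of_mem _
          by_cases hmem : "all" ∈ pwtToks ts <;> simp [hmem, this]
        · rw [List.map_cons, List.foldl_cons, hstep, i2, htoks]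
          simp [hall, pwtKeys_setdefault]
        · simpa [List.foldl_cons, hstep] using i3

-- ===== VERDICT (by name: the statement is the Claim_ definition above) =====
set_option maxHeartbeats 1000000 in
theorem parse_web_tools_spec : Claim_equal_parse_web_tools := by
  intro raw _ hpre
  unfold Spec_parse_web_tools
  match raw with
  | none => rfl
  | some r =>
    have hpre' := hpre r (by simp)
    by_cases hc : PySem.Str.lower (PySem.Str.strip r) = ""
    · simp only [parse_web_tools, parse_web_tools_alt, hc]
      decide
    · have htsA : (PySem.Str.split? (PySem.Str.lower (PySem.Str.strip r)) ",").getD []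
          = (pwtSplit [] (PySem.Str.lower (PySem.Str.strip r)).toList).map String.ofList := by
        unfold PySem.Str.split?
        rw [show (",".toList) = [','] from rfl]
        unfold PySem.Chars.split?
        simp [pwtSplitOn]
      rw [htsA] at hpre'
      have hA := pwtFold _ [] hpre'
      have hB := pwtTokFold _ false (PySem.Dict.ofList ([] : List (String × Unit))) hpre'
      have hmap : ((pwtSplit [] (PySem.Str.lower (PySem.Str.strip r)).toList).map String.ofList).map
          String.toList = pwtSplit [] (PySem.Str.lower (PySem.Str.strip r)).toList := by
        simp [List.map_map, Function.comp_def]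
      rw [hmap] at hB
      obtain ⟨b1, b2, b3⟩ := hB
      have hscan := pwtScan (PySem.Str.lower (PySem.Str.strip r)).toList false
        (PySem.Dict.ofList ([] : List (String × Unit))) [] []
      simp only [parse_web_tools, parse_web_tools_alt]
      rw [if_neg hc]
      rw [htsA, hA, hscan]
      rw [b1, b2, b3]
      dsimp only
      generalize pwtToks ((pwtSplit [] (PySem.Str.lower (PySem.Str.strip r)).toList).map String.ofList) = T
      have hk : (PySem.Dict.ofList ([] : List (String × Unit))).keys = [] := rfl
      rw [hk]
      by_cases hmem : "all" ∈ T
      · simp [hmem, pwtWEB_TOOLS]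
      · have hfil : T.filter (fun t => t ≠ "all") = T := by
          apply List.filter_eq_self.mpr
          intro x hx
          simp only [ne_eq, decide_eq_true_eq]
          exact fun e => hmem (e ▸ hx)
        rw [hfil, ← pwtStep_eq_add]
        simp [hmem]
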